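-- pv_equiv track=rewrite | github.com/gitReeQx/replyman | backend/services/appwrite_service.py | _build_user_update
-- ===== SOURCE A (Python) =====
-- _USER_FIELDS = [
--     "user_id", "email", "name", "instructions", "knowledge",
--     "file_names", "files_count", "messages_count", "trainings_count", "subscription_type",
--     "subscription_status", "subscription_paid_at", "subscription_expires_at", "yookassa_payment_id",
--     "daily_requests_count", "daily_requests_date",
--     "active_training"
-- ]
--
-- def _build_user_update(rd: dict, changes: dict) -> dict:
--     """
--     Собрать полный payload для update_row.
--     Берёт текущие данные rd, применяет changes, сохраняет ВСЕ известные поля.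
--
--     Appwrite update_row ПЕРЕЗАПИСЫВАЕТ строку — если поле не передано, оно будет очищено.
--     Поэтому обязательно включаем все _USER_FIELDS.
--     """
--     update = {}
--     for field in _USER_FIELDS:
--         if field in changes:
--             update[field] = changes[field]
--         elif field in rd:
--             update[field] = rd[field]
--     return update
-- ===== SOURCE B (Python) =====
-- _USER_FIELDS = [
--     "user_id", "email", "name", "instructions", "knowledge",
--     "file_names", "files_count", "messages_count", "trainings_count", "subscription_type",
--     "subscription_status", "subscription_paid_at", "subscription_expires_at", "yookassa_payment_id",
--     "daily_requests_count", "daily_requests_date",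
--     "active_training"
-- ]
--
-- _RANK = {f: i for i, f in enumerate(_USER_FIELDS)}
--
-- def _build_user_update(rd: dict, changes: dict) -> dict:
--     # Scan the DATA instead of the field list: collect known-field entries from rd
--     # then changes (later wins), then order the collected items by field rank.
--     picked = {}
--     for src in (rd, changes):
--         for k, v in src.items():
--             if k in _RANK:
--                 picked[k] = v
--     return dict(sorted(picked.items(), key=lambda kv: _RANK[kv[0]]))
-- ===== Notes on version B (the rewrite author's own statement) =====
-- stated objective: alternative
-- what changed: B inverts the traversal: instead of A's single pass over the fixed field list branching per field between changes and rd, B scans the two input dicts, collects entries whose key is a known field (changes processed second so it wins), and then sorts the collected items by a precomputed field-rank dict to restore _USER_FIELDS order; the Lean Pre_ only excludes association lists with duplicate keys, which represent no Python dict.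
import Mathlib
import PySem

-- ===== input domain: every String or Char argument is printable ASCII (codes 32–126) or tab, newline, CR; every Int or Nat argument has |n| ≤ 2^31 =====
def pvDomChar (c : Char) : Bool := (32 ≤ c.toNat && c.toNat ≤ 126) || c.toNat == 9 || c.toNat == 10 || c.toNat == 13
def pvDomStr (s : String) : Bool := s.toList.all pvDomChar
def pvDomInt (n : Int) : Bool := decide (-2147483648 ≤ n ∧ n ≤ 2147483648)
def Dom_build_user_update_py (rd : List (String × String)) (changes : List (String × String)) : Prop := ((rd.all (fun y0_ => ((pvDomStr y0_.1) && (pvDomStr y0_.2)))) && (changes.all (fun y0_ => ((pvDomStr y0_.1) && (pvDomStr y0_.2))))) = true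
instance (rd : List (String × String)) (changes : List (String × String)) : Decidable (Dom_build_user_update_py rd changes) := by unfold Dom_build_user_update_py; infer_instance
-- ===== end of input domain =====

-- B inverts the traversal: it scans the two input dicts collecting known-field entries
-- (changes last, so it wins) and sorts them by a precomputed field-rank dict (alternative
-- decomposition; not faster).

-- _USER_FIELDS (module constant shared by both ports)
def pvUserFields : List String :=
  ["user_id", "email", "name", "instructions", "knowledge",
   "file_names", "files_count", "messages_count", "trainings_count", "subscription_type",
   "subscription_status", "subscription_paid_at", "subscription_expires_at", "yookassa_payment_id",
   "daily_requests_count", "daily_requests_date",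
   "active_training"]

-- ===== PORT A =====
def build_user_update_py (rd : List (String × String)) (changes : List (String × String)) : List (String × String) :=
  let rdD := PySem.Dict.mk rd
  let chD := PySem.Dict.mk changes
  (pvUserFields.foldl (fun update field =>
      if chD.contains field then update.insert field (chD.getD field "")
      else if rdD.contains field then update.insert field (rdD.getD field "")
      else update) PySem.Dict.empty).items

-- ===== PORT B =====
-- _RANK = {f: i for i, f in enumerate(_USER_FIELDS)}
def pvRank : PySem.Dict String Int :=
  PySem.Dict.ofList ((PySem.List.enumerate pvUserFields 0).map (fun p => (p.2, p.1)))

-- loop body of 'for k, v in src.items(): if k in _RANK: picked[k] = v'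
def pvPickStep (d : PySem.Dict String String) (p : String × String) : PySem.Dict String String :=
  if pvRank.contains p.1 then d.insert p.1 p.2 else d

def build_user_update_py_alt (rd : List (String × String)) (changes : List (String × String)) : List (String × String) :=
  (PySem.Dict.ofList (PySem.List.sorted
     (changes.foldl pvPickStep (rd.foldl pvPickStep PySem.Dict.empty)).items
     (fun kv => pvRank.getD kv.1 0))).items

-- ===== PRECONDITION & SPEC =====
-- Pre_ excludes association lists whose keys repeat: a Python dict cannot hold duplicate
-- keys, so such lists represent no input of the Python programs.
def Pre_build_user_update_py (rd : List (String × String)) (changes : List (String × String)) : Prop :=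
  (rd.map Prod.fst).Nodup ∧ (changes.map Prod.fst).Nodup
instance (rd : List (String × String)) (changes : List (String × String)) : Decidable (Pre_build_user_update_py rd changes) := by unfold Pre_build_user_update_py; infer_instance

def pvWitness_build_user_update_py : (List (String × String)) × (List (String × String)) :=
  ([("email", "a@b"), ("name", "Ann")], [("name", "Bob"), ("knowledge", "k")])

def Spec_build_user_update_py (rd : List (String × String)) (changes : List (String × String)) (out : List (String × String)) : Prop := out = build_user_update_py_alt rd changes
instance (rd : List (String × String)) (changes : List (String × String)) (out : List (String × String)) : Decidable (Spec_build_user_update_py rd changes out) := by unfold Spec_build_user_update_py; infer_instance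

-- ===== CLAIM (what is proved, stated in full; the proofs are below) =====
def Claim_equal_build_user_update_py : Prop := ∀ (rd : List (String × String)) (changes : List (String × String)), Dom_build_user_update_py rd changes → Pre_build_user_update_py rd changes → Spec_build_user_update_py rd changes (build_user_update_py rd changes)

-- ===== LEMMAS AND PROOFS =====

-- the merged dict {**rd, **changes} A's branching realises, and A's output written as a filterMap
def pvMerged (rd changes : List (String × String)) : PySem.Dict String String :=
  changes.foldl (fun d p => d.insert p.1 p.2) (rd.foldl (fun d p => d.insert p.1 p.2) PySem.Dict.empty)

def pvT (rd changes : List (String × String)) : List (String × String) :=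
  pvUserFields.filterMap (fun f =>
    if (pvMerged rd changes).contains f then some (f, (pvMerged rd changes).getD f "") else none)

theorem pv_get?_mk {κ ν : Type} [BEq κ] [LawfulBEq κ] (l : List (κ × ν)) (k : κ) :
    (PySem.Dict.mk l).get? k = (l.find? (fun p => p.1 == k)).map (·.2) := by
  induction l with
  | nil => simp [PySem.Dict.get?]
  | cons a l ih =>
    obtain ⟨k1, v1⟩ := a
    rw [PySem.Dict.get?_mk_cons, List.find?]
    by_cases h : k1 == k <;> simp [h, ih]

theorem pv_find?_reverse_of_nodup {κ ν : Type} [BEq κ] [LawfulBEq κ]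
    (l : List (κ × ν)) (h : (l.map Prod.fst).Nodup) (k : κ) :
    l.reverse.find? (fun p => p.1 == k) = l.find? (fun p => p.1 == k) := by
  induction l with
  | nil => rfl
  | cons a l ih =>
    simp only [List.map_cons, List.nodup_cons] at h
    rw [List.reverse_cons, List.find?_append, ih h.2, List.find?]
    by_cases hk : a.1 == k
    · have : l.find? (fun p => p.1 == k) = none := by
        rw [List.find?_eq_none]
        intro p hp hpk
        exact h.1 (by
          have : p.1 = k := by simpa using hpk
          have : p.1 = a.1 := by simp_all
          exact this ▸ List.mem_map_of_mem hp)
      simp [hk, this]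
    · simp [Bool.of_not_eq_true hk]

theorem pv_get?_foldl_insert {κ ν : Type} [BEq κ] [LawfulBEq κ]
    (l : List (κ × ν)) (d : PySem.Dict κ ν) (k : κ) :
    (l.foldl (fun d p => d.insert p.1 p.2) d).get? k =
      ((l.reverse.find? (fun p => p.1 == k)).map (·.2)).or (d.get? k) := by
  induction l generalizing d with
  | nil => simp
  | cons a l ih =>
    rw [List.foldl_cons, ih, List.reverse_cons, List.find?_append, List.find?]
    by_cases hk : a.1 == k
    · have hk' : k = a.1 := by simp_all
      rcases hfind : l.reverse.find? (fun p => p.1 == k) with _ | p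
      · simp [hk', PySem.Dict.get?_insert_self]
      · simp [hfind]
    · have hk' : k ≠ a.1 := fun h => hk (by simp [h])
      rw [PySem.Dict.get?_insert_of_ne _ _ hk']
      simp [hk]

theorem pv_merged_get? (rd changes : List (String × String))
    (hrd : (rd.map Prod.fst).Nodup) (hch : (changes.map Prod.fst).Nodup) (k : String) :
    (pvMerged rd changes).get? k
      = ((PySem.Dict.mk changes).get? k).or ((PySem.Dict.mk rd).get? k) := by
  unfold pvMerged
  rw [pv_get?_foldl_insert, pv_get?_foldl_insert,
    pv_find?_reverse_of_nodup _ hch, pv_find?_reverse_of_nodup _ hrd,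
    ← pv_get?_mk, ← pv_get?_mk]
  simp

-- A's loop output is pvT
theorem pv_loop (rd changes : List (String × String))
    (hrd : (rd.map Prod.fst).Nodup) (hch : (changes.map Prod.fst).Nodup)
    (fields : List String) :
    ∀ (u : PySem.Dict String String),
      fields.Nodup → (∀ f ∈ fields, u.contains f = false) →
      (fields.foldl (fun update field =>
          if (PySem.Dict.mk changes).contains field then
            update.insert field ((PySem.Dict.mk changes).getD field "")
          else if (PySem.Dict.mk rd).contains field then
            update.insert field ((PySem.Dict.mk rd).getD field "")
          else update) u).items
        = u.items ++ fields.filterMap (fun f =>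
            if (pvMerged rd changes).contains f then
              some (f, (pvMerged rd changes).getD f "")
            else none) := by
  induction fields with
  | nil => intro u _ _; simp
  | cons f fs ih =>
    intro u hnd hu
    simp only [List.nodup_cons] at hnd
    have hufresh : u.contains f = false := hu f (by simp)
    have hm := pv_merged_get? rd changes hrd hch f
    have hnext : ∀ (v : String) (g : String), g ∈ fs → (u.insert f v).contains g = false := by
      intro v g hg
      rw [PySem.Dict.contains_insert]
      have : g ≠ f := fun h => hnd.1 (h ▸ hg)
      simp [this, hu g (List.mem_cons_of_mem _ hg)]
    rw [List.foldl_cons, List.filterMap_cons]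
    rcases hc : (PySem.Dict.mk changes).get? f with _ | v
    · rcases hr : (PySem.Dict.mk rd).get? f with _ | v
      · have hmc : (pvMerged rd changes).contains f = false := by
          rw [PySem.Dict.contains_eq_isSome_get?, hm, hc, hr]; rfl
        rw [PySem.Dict.contains_eq_isSome_get?, hc]
        rw [PySem.Dict.contains_eq_isSome_get?, hr]
        simp only [Option.isSome_none, Bool.false_eq_true, if_false, hmc]
        exact ih u hnd.2 (fun g hg => hu g (List.mem_cons_of_mem _ hg))
      · have hmg : (pvMerged rd changes).get? f = some v := by
          rw [hm, hc, hr]; rfl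
        have hmc : (pvMerged rd changes).contains f = true := by
          rw [PySem.Dict.contains_eq_isSome_get?, hmg]; rfl
        rw [PySem.Dict.contains_eq_isSome_get?, hc]
        rw [PySem.Dict.contains_eq_isSome_get?, hr]
        simp only [Option.isSome_none, Bool.false_eq_true, if_false, Option.isSome_some, if_true, hmc]
        rw [PySem.Dict.getD_eq_get?_getD, hr, PySem.Dict.getD_eq_get?_getD, hmg]
        simp only [Option.getD_some]
        rw [ih (u.insert f v) hnd.2 (hnext v), PySem.Dict.items_insert_of_not_contains _ _ hufresh]
        simp
    · have hmg : (pvMerged rd changes).get? f = some v := by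
        rw [hm, hc]; rfl
      have hmc : (pvMerged rd changes).contains f = true := by
        rw [PySem.Dict.contains_eq_isSome_get?, hmg]; rfl
      rw [PySem.Dict.contains_eq_isSome_get?, hc]
      simp only [Option.isSome_some, if_true, hmc]
      rw [PySem.Dict.getD_eq_get?_getD, hc, PySem.Dict.getD_eq_get?_getD, hmg]
      simp only [Option.getD_some]
      rw [ih (u.insert f v) hnd.2 (hnext v), PySem.Dict.items_insert_of_not_contains _ _ hufresh]
      simp

-- ----- B-side lemmas -----

theorem pvRank_keys : pvRank.keys = pvUserFields := by decide

theorem pv_contains_rank (f : String) : pvRank.contains f = true ↔ f ∈ pvUserFields := by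
  rw [PySem.Dict.contains_iff_mem_keys, pvRank_keys]

theorem pv_step_get? (l : List (String × String)) (d : PySem.Dict String String) (k : String) :
    (l.foldl pvPickStep d).get? k =
      if pvRank.contains k then
        ((l.reverse.find? (fun p => p.1 == k)).map (·.2)).or (d.get? k)
      else d.get? k := by
  induction l generalizing d with
  | nil => simp
  | cons a l ih =>
    rw [List.foldl_cons, ih, List.reverse_cons, List.find?_append, List.find?]
    by_cases hc : pvRank.contains k
    · simp only [hc, if_true]
      by_cases hk : a.1 == k
      · have hk' : k = a.1 := by simp_all
        rcases hfind : l.reverse.find? (fun p => p.1 == k) with _ | p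
        · have : pvRank.contains a.1 = true := hk' ▸ hc
          simp [pvPickStep, this, hk', PySem.Dict.get?_insert_self]
        · simp [hfind]
      · have hk' : k ≠ a.1 := fun h => hk (by simp [h])
        unfold pvPickStep
        by_cases ha : pvRank.contains a.1
        · rw [if_pos ha, PySem.Dict.get?_insert_of_ne _ _ hk']
          simp [hk]
        · rw [if_neg ha]
          simp [hk]
    · simp only [hc]
      unfold pvPickStep
      by_cases hk : a.1 == k
      · have hk' : a.1 = k := by simpa using hk
        have : pvRank.contains a.1 = false := by
          rw [hk']; exact Bool.not_eq_true _ ▸ (by simpa using hc)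
        simp [this]
      · have hk' : k ≠ a.1 := fun h => hk (by simp [h])
        by_cases ha : pvRank.contains a.1
        · rw [if_pos ha, PySem.Dict.get?_insert_of_ne _ _ hk']
          simp
        · rw [if_neg ha]
          simp

theorem pv_picked_get? (rd changes : List (String × String)) (k : String) :
    (changes.foldl pvPickStep (rd.foldl pvPickStep PySem.Dict.empty)).get? k =
      if pvRank.contains k then (pvMerged rd changes).get? k else none := by
  rw [pv_step_get?, pv_step_get?]
  unfold pvMerged
  rw [pv_get?_foldl_insert, pv_get?_foldl_insert]
  by_cases hc : pvRank.contains k = true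
  · simp only [if_pos hc]
  · simp only [if_neg hc]
    simp

theorem pv_nodup_keys_step (l : List (String × String)) :
    ∀ (d : PySem.Dict String String), d.keys.Nodup → (l.foldl pvPickStep d).keys.Nodup := by
  induction l with
  | nil => intro d h; exact h
  | cons a l ih =>
    intro d h
    rw [List.foldl_cons]
    apply ih
    unfold pvPickStep
    by_cases hc : pvRank.contains a.1
    · rw [if_pos hc]; exact PySem.Dict.nodup_keys_insert _ _ _ h
    · rw [if_neg hc]; exact h

theorem pv_filterMap_eq_map_filter (l : List String) (m : PySem.Dict String String) :
    l.filterMap (fun f => if m.contains f then some (f, m.getD f "") else none)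
      = (l.filter (fun f => m.contains f)).map (fun f => (f, m.getD f "")) := by
  induction l with
  | nil => rfl
  | cons a l ih =>
    rw [List.filterMap_cons, List.filter_cons]
    by_cases hc : m.contains a <;> simp [hc, ih]

theorem pv_fields_pairwise :
    pvUserFields.Pairwise (fun a b => pvRank.getD a 0 < pvRank.getD b 0) := by decide

theorem pv_fields_nodup : pvUserFields.Nodup := by decide

-- ===== VERDICT (by name: the statement is the Claim_ definition above) =====
theorem build_user_update_py_spec : Claim_equal_build_user_update_py := by
  intro rd changes _ hpre
  unfold Spec_build_user_update_py
  -- A's output is pvT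
  have hA : build_user_update_py rd changes = pvT rd changes := by
    unfold build_user_update_py pvT
    rw [pv_loop rd changes hpre.1 hpre.2 pvUserFields PySem.Dict.empty pv_fields_nodup
        (fun f _ => PySem.Dict.contains_empty ..)]
    rfl
  rw [hA]
  -- B's output is also pvT
  unfold build_user_update_py_alt
  set M := pvMerged rd changes with hM
  set picked := changes.foldl pvPickStep (rd.foldl pvPickStep PySem.Dict.empty) with hpicked
  set Tkeys := pvUserFields.filter (fun f => M.contains f) with hTk
  have hT : pvT rd changes = Tkeys.map (fun f => (f, M.getD f "")) := by
    unfold pvT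
    rw [← hM, pv_filterMap_eq_map_filter]
  have hnodup : picked.keys.Nodup := by
    rw [hpicked]
    exact pv_nodup_keys_step _ _ (pv_nodup_keys_step _ _ (by simp [PySem.Dict.keys_empty]))
  have hpick : ∀ k, picked.get? k = if pvRank.contains k then M.get? k else none := by
    intro k; rw [hpicked, hM]; exact pv_picked_get? rd changes k
  -- membership in picked.keys
  have hmemP : ∀ k, k ∈ picked.keys ↔ (pvRank.contains k = true ∧ M.contains k = true) := by
    intro k
    by_cases hc : pvRank.contains k = true
    · rw [← PySem.Dict.contains_iff_mem_keys, PySem.Dict.contains_eq_isSome_get?, hpick k,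
        if_pos hc, ← PySem.Dict.contains_eq_isSome_get?]
      simp [hc]
    · rw [← PySem.Dict.contains_iff_mem_keys, PySem.Dict.contains_eq_isSome_get?, hpick k,
        if_neg hc]
      simp [hc]
  have hmemT : ∀ k, k ∈ Tkeys ↔ (k ∈ pvUserFields ∧ M.contains k = true) := by
    intro k; rw [hTk, List.mem_filter]
  have hTnodup : Tkeys.Nodup := by rw [hTk]; exact pv_fields_nodup.filter _
  have hkeysPerm : Tkeys.Perm picked.keys := by
    apply List.perm_of_nodup_nodup_toFinset_eq hTnodup hnodup
    apply Finset.ext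
    intro k
    rw [List.mem_toFinset, List.mem_toFinset, hmemT k, hmemP k, pv_contains_rank]
  -- picked.items is picked.keys mapped through the merged lookup
  have hitems : picked.items = picked.keys.map (fun k => (k, M.getD k "")) := by
    rw [PySem.Dict.items_eq_map_keys picked hnodup ""]
    apply List.map_congr_left
    intro k hk
    have hck : pvRank.contains k = true := ((hmemP k).mp hk).1
    rw [PySem.Dict.getD_eq_get?_getD, hpick k, if_pos hck, ← PySem.Dict.getD_eq_get?_getD]
  have hperm : (Tkeys.map (fun f => (f, M.getD f ""))).Perm picked.items := by
    rw [hitems]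
    exact hkeysPerm.map _
  have hpair : (Tkeys.map (fun f => (f, M.getD f ""))).Pairwise
      (fun a b => pvRank.getD a.1 0 < pvRank.getD b.1 0) := by
    rw [List.pairwise_map]
    exact (pv_fields_pairwise.filter _)
  have hsorted : PySem.List.sorted picked.items (fun kv => pvRank.getD kv.1 0)
      = Tkeys.map (fun f => (f, M.getD f "")) :=
    PySem.List.sorted_eq_of_perm_of_pairwise_lt _ _ _ hperm hpair
  rw [hsorted, hT]
  -- dict() of a nodup-keyed list keeps it as-is
  have hfst : ((Tkeys.map (fun f => (f, M.getD f ""))).map Prod.fst).Nodup := by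
    have hcomp : (Prod.fst ∘ fun f => (f, M.getD f "")) = fun f => f := rfl
    rw [List.map_map, hcomp, List.map_id']
    exact hTnodup
  rw [show PySem.Dict.ofList (Tkeys.map (fun f => (f, M.getD f ""))) =
        (Tkeys.map (fun f => (f, M.getD f ""))).foldl
          (fun d a => d.insert a.1 a.2) PySem.Dict.empty from rfl,
    PySem.Dict.items_foldl_insert_fresh _ Prod.fst Prod.snd PySem.Dict.empty
      (fun a _ => PySem.Dict.contains_empty ..) hfst]
  have hempty : (PySem.Dict.empty : PySem.Dict String String).items = ([] : List (String × String)) := rfl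
  have hid : (fun (a : String × String) => (a.1, a.2)) = id := rfl
  rw [hempty, List.nil_append, hid, List.map_id]
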